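-- pv_equiv track=rewrite | github.com/ssssam/calliope | calliope/export/__init__.py | convert_to_m3u
-- ===== SOURCE A (Python) =====
-- def convert_to_m3u(playlist):
--     output_text = []
--     for i, item in enumerate(playlist):
--         if 'location' in item:
--             output_text.append(item['location'])
--         else:
--             raise RuntimeError("The 'location' field must be set for all entries "
--                                 "in order to create an M3U playlist")
--     return '\n'.join(output_text)
-- ===== SOURCE B (Python) =====
-- def convert_to_m3u(playlist):
--     if not playlist:
--         return ''
--     head, rest = playlist[0], playlist[1:]
--     if 'location' not in head:
--         raise RuntimeError("The 'location' field must be set for all entries "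
--                            "in order to create an M3U playlist")
--     if not rest:
--         return head['location']
--     return head['location'] + '\n' + convert_to_m3u(rest)
-- ===== Notes on version B (the rewrite author's own statement) =====
-- stated objective: alternative
-- what changed: Replaces A's iterative accumulate-into-a-list-then-join loop by direct structural recursion on the playlist that concatenates each location with '\n' onto the recursively built tail, never materialising the intermediate list; same RuntimeError on the first entry without a location.
import Mathlib
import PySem

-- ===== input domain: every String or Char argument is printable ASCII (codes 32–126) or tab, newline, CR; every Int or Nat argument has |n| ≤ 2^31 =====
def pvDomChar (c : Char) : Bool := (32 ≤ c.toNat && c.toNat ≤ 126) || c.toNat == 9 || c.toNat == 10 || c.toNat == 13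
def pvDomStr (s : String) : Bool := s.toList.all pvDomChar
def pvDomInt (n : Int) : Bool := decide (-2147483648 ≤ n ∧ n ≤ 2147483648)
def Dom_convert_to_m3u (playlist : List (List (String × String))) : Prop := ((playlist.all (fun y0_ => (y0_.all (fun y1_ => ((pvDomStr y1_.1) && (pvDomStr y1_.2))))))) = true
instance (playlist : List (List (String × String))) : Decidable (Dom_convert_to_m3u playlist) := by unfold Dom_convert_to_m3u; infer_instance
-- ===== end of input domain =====

-- B replaces A's accumulate-into-a-list-then-join loop by direct structural recursion concatenating locations with "\n"; same exception (objective: alternative).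
-- ===== PORT A =====
-- the fused loop: appends each location, or fails (Python: raise RuntimeError) on the first item without one
def convA_go : List (List (String × String)) → List String → Option (List String)
  | [], acc => some acc
  | item :: rest, acc =>
    if (PySem.Dict.mk item).contains "location" then
      convA_go rest (acc ++ [(PySem.Dict.mk item).getD "location" ""])
    else
      none   -- raise RuntimeError(...)  (excluded by Pre_)

def convert_to_m3u (playlist : List (List (String × String))) : String :=
  match convA_go playlist [] with
  | some output_text => PySem.Str.join "\n" output_text
  | none => ""   -- unreachable under Pre_ (Python raises here)

-- ===== PORT B =====
def convert_to_m3u_alt : List (List (String × String)) → String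
  | [] => ""
  | head :: rest =>
    if (PySem.Dict.mk head).contains "location" then
      if rest.isEmpty then (PySem.Dict.mk head).getD "location" ""
      else (PySem.Dict.mk head).getD "location" "" ++ "\n" ++ convert_to_m3u_alt rest
    else ""   -- raise RuntimeError(...)  (excluded by Pre_)

-- ===== PRECONDITION & SPEC =====
-- Pre_ excludes exactly the playlists containing an entry without a 'location' key, on which the Python raises RuntimeError.
def Pre_convert_to_m3u (playlist : List (List (String × String))) : Prop :=
  ∀ item ∈ playlist, (PySem.Dict.mk item).contains "location" = true
instance (playlist : List (List (String × String))) : Decidable (Pre_convert_to_m3u playlist) := by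
  unfold Pre_convert_to_m3u; infer_instance
def pvWitness_convert_to_m3u : (List (List (String × String))) :=
  [[("location", "a.mp3")], [("location", "b.mp3"), ("title", "B")]]

def Spec_convert_to_m3u (playlist : List (List (String × String))) (out : String) : Prop := out = convert_to_m3u_alt playlist
instance (playlist : List (List (String × String))) (out : String) : Decidable (Spec_convert_to_m3u playlist out) := by unfold Spec_convert_to_m3u; infer_instance

-- ===== CLAIM =====
def Claim_equal_convert_to_m3u : Prop := ∀ (playlist : List (List (String × String))), Dom_convert_to_m3u playlist → Pre_convert_to_m3u playlist → Spec_convert_to_m3u playlist (convert_to_m3u playlist)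

-- ===== LEMMAS AND PROOFS =====
theorem convA_go_eq (playlist : List (List (String × String)))
    (h : Pre_convert_to_m3u playlist) (acc : List String) :
    convA_go playlist acc
      = some (acc ++ playlist.map (fun item => (PySem.Dict.mk item).getD "location" "")) := by
  induction playlist generalizing acc with
  | nil => simp [convA_go]
  | cons item rest ih =>
    have hitem := h item (List.mem_cons_self ..)
    have hrest : Pre_convert_to_m3u rest := fun x hx => h x (List.mem_cons_of_mem _ hx)
    simp [convA_go, hitem, ih hrest]

theorem join_cons2 (a : String) (b : String) (bs : List String) :
    PySem.Str.join "\n" (a :: b :: bs) = a ++ "\n" ++ PySem.Str.join "\n" (b :: bs) := by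
  rw [← String.toList_inj]
  simp [PySem.Str.join, PySem.Chars.join_cons_cons]

theorem alt_eq_join (playlist : List (List (String × String)))
    (h : Pre_convert_to_m3u playlist) :
    convert_to_m3u_alt playlist
      = PySem.Str.join "\n" (playlist.map (fun item => (PySem.Dict.mk item).getD "location" "")) := by
  induction playlist with
  | nil => simp [convert_to_m3u_alt, PySem.Str.join, PySem.Chars.join, List.intercalate]
  | cons head rest ih =>
    have hhead := h head (List.mem_cons_self ..)
    have hrest : Pre_convert_to_m3u rest := fun x hx => h x (List.mem_cons_of_mem _ hx)
    cases rest with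
    | nil => simp [convert_to_m3u_alt, hhead, PySem.Str.join, PySem.Chars.join, List.intercalate]
    | cons b bs =>
      have ih' := ih hrest
      rw [List.map_cons] at ih'
      rw [List.map_cons, List.map_cons, join_cons2, ← ih']
      conv_lhs => rw [convert_to_m3u_alt]
      simp [hhead]

-- ===== VERDICT =====
theorem convert_to_m3u_spec : Claim_equal_convert_to_m3u := by
  intro playlist _ hpre
  unfold Spec_convert_to_m3u convert_to_m3u
  rw [convA_go_eq playlist hpre [], alt_eq_join playlist hpre]
  simp
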